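-- pv_equiv track=rewrite | github.com/ksheasby-va/PyKata | advent_2016/day_03_2.py | build_string_from_list
-- ===== SOURCE A (Python) =====
-- def build_string_from_list(column):
--     i = 1
--     string = ''
--     for side in column:
--         if (i % 3) == 0:
--             i = 1
--             string += side
--             string += '\n'
--         else:
--             i += 1
--             string += side + ' '
--
--     return string
-- ===== SOURCE B (Python) =====
-- def build_string_from_list(column):
--     items = list(column)
--     n = len(items)
--     seps = [' ', ' ', '\n'] * ((n + 2) // 3)
--     return ''.join(map(''.join, zip(items, seps)))
-- ===== Notes on version B (the rewrite author's own statement) =====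
-- stated objective: alternative
-- what changed: Replaces A's stateful mod-3 counter and running string concatenation with a stateless staged construction: a cyclic separator stream (space, space, newline) is precomputed to the input's length and zipped element-by-element with the input, then joined once.
import Mathlib
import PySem

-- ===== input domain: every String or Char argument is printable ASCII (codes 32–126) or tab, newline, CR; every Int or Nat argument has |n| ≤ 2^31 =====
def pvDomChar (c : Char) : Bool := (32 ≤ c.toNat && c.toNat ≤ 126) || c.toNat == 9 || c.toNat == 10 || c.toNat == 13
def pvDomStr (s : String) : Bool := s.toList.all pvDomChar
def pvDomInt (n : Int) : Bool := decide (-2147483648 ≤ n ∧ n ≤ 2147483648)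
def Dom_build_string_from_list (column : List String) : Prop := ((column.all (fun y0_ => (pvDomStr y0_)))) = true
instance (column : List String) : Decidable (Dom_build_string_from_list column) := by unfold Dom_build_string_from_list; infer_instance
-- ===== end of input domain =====

-- B replaces A's stateful mod-3 counter with a stateless staged build: precompute a cyclic separator stream, zip it with the input, join once (same cost, different structure).

-- ===== PORT A =====
-- A's loop state: the counter i and the accumulated string.
def buildStepA (st : Int × String) (side : String) : Int × String :=
  if st.1 % 3 == 0 then (1, st.2 ++ side ++ "\n")
  else (st.1 + 1, st.2 ++ (side ++ " "))

def build_string_from_list (column : List String) : String :=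
  (column.foldl buildStepA (1, "")).2

-- ===== PORT B =====
-- B: seps = [' ',' ','\n'] * ((n+2)//3)  (n = length, nonnegative, so Nat division is exact);
-- zip truncates the separator stream to n, each pair is concatenated, all pieces joined once.
def build_string_from_list_alt (column : List String) : String :=
  let n := column.length
  let seps := (List.replicate ((n + 2) / 3) [" ", " ", "\n"]).flatten
  String.join ((column.zip seps).map (fun p => String.join [p.1, p.2]))

-- ===== PRECONDITION & SPEC =====
def Spec_build_string_from_list (column : List String) (out : String) : Prop := out = build_string_from_list_alt column
instance (column : List String) (out : String) : Decidable (Spec_build_string_from_list column out) := by unfold Spec_build_string_from_list; infer_instance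

-- ===== CLAIM (what is proved, stated in full; the proofs are below) =====
def Claim_equal_build_string_from_list : Prop := ∀ (column : List String), Dom_build_string_from_list column → Spec_build_string_from_list column (build_string_from_list column)

-- ===== LEMMAS AND PROOFS =====

theorem toList_join (xs : List String) :
    (String.join xs).toList = (xs.map String.toList).flatten := by
  simp [String.join_eq]

-- common three-at-a-time characterisation of the output (at the List Char level)
def pvRows : List String → String
  | a :: b :: c :: rest => a ++ " " ++ b ++ " " ++ c ++ "\n" ++ pvRows rest
  | [a, b] => a ++ " " ++ b ++ " "
  | [a] => a ++ " "
  | [] => ""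

theorem foldA_rows : ∀ (col : List String) (s : String),
    ((col.foldl buildStepA (1, s)).2).toList = s.toList ++ (pvRows col).toList := by
  intro col
  induction col using pvRows.induct with
  | case1 a b c rest ih =>
      intro s
      simp [List.foldl, buildStepA, ih, pvRows, String.toList_append]
  | case2 a b =>
      intro s; simp [List.foldl, buildStepA, pvRows, String.toList_append]
  | case3 a =>
      intro s; simp [List.foldl, buildStepA, pvRows, String.toList_append]
  | case4 =>
      intro s; simp [List.foldl, pvRows]

theorem zipB_rows : ∀ (col : List String),
    (String.join ((col.zip
        ((List.replicate ((col.length + 2) / 3) [" ", " ", "\n"]).flatten)).map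
        (fun p => String.join [p.1, p.2]))).toList
    = (pvRows col).toList := by
  intro col
  induction col using pvRows.induct with
  | case1 a b c rest ih =>
      have hdiv : (rest.length + 3 + 2) / 3 = (rest.length + 2) / 3 + 1 := by omega
      simp only [List.length_cons]
      rw [show rest.length + 1 + 1 + 1 = rest.length + 3 by omega, hdiv,
        List.replicate_succ]
      rw [toList_join] at ih ⊢
      simp [pvRows, String.toList_append, String.join] at ih ⊢
      simp [ih]
  | case2 a b =>
      simp [pvRows, String.join, String.toList_append]
  | case3 a =>
      simp [pvRows, String.join, String.toList_append]
  | case4 =>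
      simp [pvRows, String.join]

-- ===== VERDICT (by name: the statement is the Claim_ definition above) =====
theorem build_string_from_list_spec : Claim_equal_build_string_from_list := by
  intro column _
  unfold Spec_build_string_from_list build_string_from_list build_string_from_list_alt
  rw [← String.toList_inj]
  rw [foldA_rows, zipB_rows]
  simp
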